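-- pv_equiv track=rewrite | github.com/jerabaul29/LoggerWavesInIce | processing_scripts/process_IMU_data_structure.py | limit_valid_indexes
-- ===== SOURCE A (Python) =====
-- def limit_valid_indexes(all_timestamps, min_time, max_time):
--     """find the min and max indexes for each all_timestamps[in_between] is between
--     min_time and max_time"""
--
--     min_ind = 0
--
--     for crrt_ind in range(len(all_timestamps)):
--         if all_timestamps[crrt_ind] > min_time:
--             min_ind = crrt_ind
--             break
--
--     max_ind = 0
--     nbr_ind = len(all_timestamps)
--
--     for crrt_ind in range(len(all_timestamps)):
--         if all_timestamps[nbr_ind - crrt_ind - 1] < max_time: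
--             max_ind = nbr_ind - crrt_ind - 1
--             break
--
--     return(min_ind, max_ind)
-- ===== SOURCE B (Python) =====
-- def limit_valid_indexes(all_timestamps, min_time, max_time):
--     """Single forward pass: record the first index with t > min_time and the
--     last index with t < max_time (both default to 0), instead of A's two
--     separate forward and backward scans with early breaks."""
--     min_ind = 0
--     max_ind = 0
--     found_min = False
--     for i, t in enumerate(all_timestamps):
--         if not found_min and t > min_time:
--             min_ind = i
--             found_min = True
--         if t < max_time:
--             max_ind = i
--     return (min_ind, max_ind)
-- ===== Notes on version B (the rewrite author's own statement) =====
-- stated objective: alternative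
-- what changed: Replaces A's two index-based scans (a forward scan with break for the first timestamp > min_time and a backward scan with break for the last timestamp < max_time) by a single forward pass over enumerate that tracks both indexes at once.
import Mathlib
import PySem

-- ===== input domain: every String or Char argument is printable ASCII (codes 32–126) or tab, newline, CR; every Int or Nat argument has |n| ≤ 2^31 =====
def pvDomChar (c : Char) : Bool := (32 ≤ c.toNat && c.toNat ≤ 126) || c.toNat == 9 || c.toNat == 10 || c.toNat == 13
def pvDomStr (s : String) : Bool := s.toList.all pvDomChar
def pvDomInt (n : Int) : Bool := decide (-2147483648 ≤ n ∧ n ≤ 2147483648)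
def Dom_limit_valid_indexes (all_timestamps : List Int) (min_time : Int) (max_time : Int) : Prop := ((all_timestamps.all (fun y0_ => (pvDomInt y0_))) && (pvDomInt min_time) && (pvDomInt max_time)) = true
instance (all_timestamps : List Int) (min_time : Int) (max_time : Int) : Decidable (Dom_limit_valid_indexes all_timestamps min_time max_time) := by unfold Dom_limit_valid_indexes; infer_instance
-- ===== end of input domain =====

-- B replaces A's two directed scans with early break by one forward pass tracking both indexes; same O(n) cost, different traversal.

-- ===== PORT A =====
-- A's first loop: crrt_ind = 0,1,…; break (returning crrt_ind) at the first
-- timestamp > min_time; min_ind stays 0 if the loop never breaks.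
def aFirstGo (min_time : Int) : List Int → Nat → Int
  | [], _ => 0
  | t :: rest, i => if t > min_time then (i : Int) else aFirstGo min_time rest (i + 1)

-- A's second loop: crrt_ind = 0,1,… checks index nbr_ind - crrt_ind - 1, i.e. the
-- index m-1 for m = n, n-1, …, 1; break at the first timestamp < max_time;
-- max_ind stays 0 if the loop never breaks.  ts.getD (m-1) 0 is exact: the index
-- is always in range.
def aBackGo (ts : List Int) (max_time : Int) : Nat → Int
  | 0 => 0
  | m + 1 => if ts.getD m 0 < max_time then (m : Int) else aBackGo ts max_time m

def limit_valid_indexes (all_timestamps : List Int) (min_time : Int) (max_time : Int) : Int × Int :=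
  (aFirstGo min_time all_timestamps 0, aBackGo all_timestamps max_time all_timestamps.length)

-- ===== PORT B =====
-- state = (found_min, min_ind, max_ind); one fold over enumerate(all_timestamps).
def bStep (min_time max_time : Int) (s : Bool × Int × Int) (p : Int × Int) : Bool × Int × Int :=
  let s1 := if !s.1 && decide (p.2 > min_time) then (true, p.1, s.2.2) else s
  if p.2 < max_time then (s1.1, s1.2.1, p.1) else s1

def limit_valid_indexes_alt (all_timestamps : List Int) (min_time : Int) (max_time : Int) : Int × Int :=
  let s := (PySem.List.enumerate all_timestamps 0).foldl (bStep min_time max_time) (false, 0, 0)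
  (s.2.1, s.2.2)

-- ===== PRECONDITION & SPEC =====
def Spec_limit_valid_indexes (all_timestamps : List Int) (min_time : Int) (max_time : Int) (out : Int × Int) : Prop := out = limit_valid_indexes_alt all_timestamps min_time max_time
instance (all_timestamps : List Int) (min_time : Int) (max_time : Int) (out : Int × Int) : Decidable (Spec_limit_valid_indexes all_timestamps min_time max_time out) := by unfold Spec_limit_valid_indexes; infer_instance

-- ===== CLAIM (what is proved, stated in full; the proofs are below) =====
def Claim_equal_limit_valid_indexes : Prop := ∀ (all_timestamps : List Int) (min_time : Int) (max_time : Int), Dom_limit_valid_indexes all_timestamps min_time max_time → Spec_limit_valid_indexes all_timestamps min_time max_time (limit_valid_indexes all_timestamps min_time max_time)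

-- ===== LEMMAS AND PROOFS =====

-- aFirstGo on a snoc: the appended element only matters when nothing matched before.
theorem aFirstGo_append (min_time t : Int) (ts : List Int) (i : Nat) :
    aFirstGo min_time (ts ++ [t]) i =
      if ts.any (fun x => decide (x > min_time)) then aFirstGo min_time ts i
      else if t > min_time then ((i : Int) + ts.length) else 0 := by
  induction ts generalizing i with
  | nil => simp [aFirstGo]
  | cons x rest ih =>
    simp only [List.cons_append, aFirstGo, List.any_cons]
    by_cases hx : x > min_time
    · simp [hx]
    · simp [hx, ih (i + 1)]
      split_ifs with h1 h2 <;> push_cast <;> ring_nf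

-- aBackGo never looks at indexes ≥ m, so a snoc is invisible below ts.length.
theorem aBackGo_append_le (ts : List Int) (t max_time : Int) (m : Nat) (hm : m ≤ ts.length) :
    aBackGo (ts ++ [t]) max_time m = aBackGo ts max_time m := by
  induction m with
  | zero => rfl
  | succ k ih =>
    have hk : k < ts.length := hm
    simp only [aBackGo]
    rw [List.getD_append _ _ _ _ hk, ih (Nat.le_of_lt hk)]

-- if nothing matches, aFirstGo returns 0 regardless of the running index.
theorem aFirstGo_none (min_time : Int) (ts : List Int) (i : Nat)
    (h : ts.any (fun x => decide (x > min_time)) = false) : aFirstGo min_time ts i = 0 := by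
  induction ts generalizing i with
  | nil => rfl
  | cons x rest ih =>
    simp only [List.any_cons, Bool.or_eq_false_iff] at h
    simp only [aFirstGo]
    rw [if_neg (by simpa using h.1)]
    exact ih (i + 1) h.2

-- the fold over enumerate computes exactly A's three quantities.
theorem fold_state (ts : List Int) (min_time max_time : Int) :
    (PySem.List.enumerate ts 0).foldl (bStep min_time max_time) (false, 0, 0) =
      (ts.any (fun x => decide (x > min_time)),
       aFirstGo min_time ts 0,
       aBackGo ts max_time ts.length) := by
  induction ts using List.reverseRecOn with
  | nil => rfl
  | append_singleton ts t ih =>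
    rw [PySem.List.enumerate_append, List.foldl_append, ih]
    simp only [PySem.List.enumerate, List.foldl_cons, List.foldl_nil]
    have hfirst := aFirstGo_append min_time t ts 0
    have hback : aBackGo (ts ++ [t]) max_time (ts ++ [t]).length =
        if t < max_time then (ts.length : Int) else aBackGo ts max_time ts.length := by
      simp only [List.length_append, List.length_cons, List.length_nil, Nat.zero_add, aBackGo]
      rw [List.getD_append_right _ _ _ _ (Nat.le_refl _)]
      simp [aBackGo_append_le ts t max_time ts.length (Nat.le_refl _)]
    rw [hfirst] at *
    simp only [List.any_append, List.any_cons, List.any_nil, Bool.or_false]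
    rw [hback]
    by_cases hfound : ts.any (fun x => decide (x > min_time))
    · by_cases hmin : t > min_time <;> by_cases hmax : t < max_time <;>
        simp [bStep, hfound, hmin, hmax]
    · have h0 := aFirstGo_none min_time ts 0 (by simpa using hfound)
      by_cases hmin : t > min_time <;> by_cases hmax : t < max_time <;>
        simp [bStep, hfound, hmin, hmax, h0]

-- ===== VERDICT (by name: the statement is the Claim_ definition above) =====
theorem limit_valid_indexes_spec : Claim_equal_limit_valid_indexes := by
  intro ts min_time max_time _
  show _ = _
  unfold limit_valid_indexes limit_valid_indexes_alt
  rw [fold_state]
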